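-- pv_equiv track=rewrite | github.com/cryptotomte/ev-charging-manager | tests/test_export_docs.py | _extract_event_field
-- ===== SOURCE A (Python) =====
-- def _extract_event_field(template_str: str) -> str | None:
--     """Extract the event data field name from a Jinja2 template string.
--
--     Parses patterns like '{{ trigger.event.data.field_name | ... }}'.
--     """
--     prefix = "trigger.event.data."
--     idx = template_str.find(prefix)
--     if idx == -1:
--         return None
--     start = idx + len(prefix)
--     # Field name ends at space, pipe, or closing brace
--     end = start
--     while end < len(template_str) and template_str[end] not in (" ", "|", "}"):
--         end += 1
--     return template_str[start:end].strip()
-- ===== SOURCE B (Python) =====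
-- def _extract_event_field(template_str: str) -> str | None:
--     """Extract the event data field name from a Jinja2 template string.
--
--     Splits off the text after the first 'trigger.event.data.' and cuts it at
--     the earliest of the three delimiters, found by substring search instead of
--     a character-by-character scan.
--     """
--     _, sep, rest = template_str.partition("trigger.event.data.")
--     if not sep:
--         return None
--     cut = len(rest)
--     for delim in " |}":
--         i = rest.find(delim)
--         if i != -1 and i < cut:
--             cut = i
--     return rest[:cut].strip()
-- ===== Notes on version B (the rewrite author's own statement) =====
-- stated objective: alternative
-- what changed: Replaces the manual find-index arithmetic and the character-by-character while loop with str.partition to split off the text after the prefix and three substring find calls whose minimum gives the cut point.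
import Mathlib
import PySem

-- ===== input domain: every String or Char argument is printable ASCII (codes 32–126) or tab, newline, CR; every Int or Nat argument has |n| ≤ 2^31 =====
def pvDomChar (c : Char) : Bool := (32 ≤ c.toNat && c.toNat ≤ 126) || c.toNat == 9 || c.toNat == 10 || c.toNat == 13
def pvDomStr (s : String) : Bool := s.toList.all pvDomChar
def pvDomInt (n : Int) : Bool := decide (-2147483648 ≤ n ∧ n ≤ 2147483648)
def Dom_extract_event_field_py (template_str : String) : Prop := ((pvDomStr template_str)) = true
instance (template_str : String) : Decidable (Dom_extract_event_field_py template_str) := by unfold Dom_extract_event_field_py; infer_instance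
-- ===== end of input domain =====

-- B replaces A's find-index arithmetic and char-by-char while loop by a partition at the
-- prefix plus three substring `find` calls whose minimum is the cut point (alternative).

-- ===== PORT A =====
-- the `while end < len(s) and s[end] not in (" ", "|", "}")` loop, returning the final `end`
def pvLoopA (l : List Char) (e : Nat) : Nat :=
  if h : e < l.length then
    if l[e] = ' ' ∨ l[e] = '|' ∨ l[e] = '}' then e
    else pvLoopA l (e + 1)
  else e
termination_by l.length - e

def extract_event_field_py (template_str : String) : Option String :=
  let idx := PySem.Str.find template_str "trigger.event.data."
  if idx = -1 then none
  else
    let start : Nat := idx.toNat + 19   -- 19 = len("trigger.event.data.")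
    let chars := template_str.toList
    let e := pvLoopA chars start
    some (String.ofList (PySem.Chars.strip
      (PySem.List.slice chars (some (start : Int)) (some (e : Int)))))

-- ===== PORT B =====
-- partition at the prefix (first occurrence = find), then cut `rest` at the smallest
-- index returned by find for each of the three delimiters, then strip
def extract_event_field_py_alt (template_str : String) : Option String :=
  let chars := template_str.toList
  let idx := PySem.Chars.find chars "trigger.event.data.".toList
  if idx = -1 then none
  else
    let rest := chars.drop (idx.toNat + 19)   -- 19 = length of the partition separator
    let cut := [' ', '|', '}'].foldl
      (fun (cut : Nat) (d : Char) =>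
        let i := PySem.Chars.find rest [d]
        if i ≠ -1 ∧ i < (cut : Int) then i.toNat else cut)
      rest.length
    some (String.ofList (PySem.Chars.strip (rest.take cut)))

-- ===== PRECONDITION & SPEC =====
def Spec_extract_event_field_py (template_str : String) (out : Option String) : Prop := out = extract_event_field_py_alt template_str
instance (template_str : String) (out : Option String) : Decidable (Spec_extract_event_field_py template_str out) := by unfold Spec_extract_event_field_py; infer_instance

-- ===== CLAIM (what is proved, stated in full; the proofs are below) =====
def Claim_equal_extract_event_field_py : Prop := ∀ (template_str : String), Dom_extract_event_field_py template_str → Spec_extract_event_field_py template_str (extract_event_field_py template_str)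

-- ===== LEMMAS AND PROOFS =====

-- characters that do NOT end the field name
def pvKeep (c : Char) : Bool := !(c == ' ' || c == '|' || c == '}')

-- first index of d in t (t.length if absent)
def pvIdx (d : Char) (t : List Char) : Nat := (t.takeWhile (fun c => !(c == d))).length

theorem pvIdx_cons (d c : Char) (t : List Char) :
    pvIdx d (c :: t) = if c = d then 0 else pvIdx d t + 1 := by
  by_cases h : c = d <;> simp [pvIdx, h]

theorem pvIdx_of_not_mem (d : Char) (t : List Char) (h : d ∉ t) : pvIdx d t = t.length := by
  induction t with
  | nil => rfl
  | cons c t ih =>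
    simp only [List.mem_cons, not_or] at h
    simp [pvIdx_cons, Ne.symm h.1, ih h.2]

theorem pvIdx_getElem? (d : Char) (t : List Char) (h : d ∈ t) :
    t[pvIdx d t]? = some d := by
  induction t with
  | nil => cases h
  | cons c t ih =>
    by_cases hc : c = d
    · simp [pvIdx_cons, hc]
    · have : d ∈ t := by cases h with
        | head => exact absurd rfl hc
        | tail _ h' => exact h'
      simp [pvIdx_cons, hc, ih this]

theorem pvIdx_min (d : Char) (t : List Char) (i : Nat) (hi : i < pvIdx d t) :
    t[i]? ≠ some d := by
  induction t generalizing i with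
  | nil => simp [pvIdx] at hi
  | cons c t ih =>
    by_cases hc : c = d
    · simp [pvIdx_cons, hc] at hi
    · rw [pvIdx_cons] at hi
      simp only [hc, if_false] at hi
      cases i with
      | zero => simpa using hc
      | succ i => simpa using ih i (by omega)

-- [d] is a prefix of u iff u starts with d
theorem prefix_singleton (d : Char) (u : List Char) : [d] <+: u ↔ ∃ v, u = d :: v := by
  constructor
  · rintro ⟨v, rfl⟩; exact ⟨v, rfl⟩
  · rintro ⟨v, rfl⟩; exact ⟨v, rfl⟩

-- Python `rest.find(d)` for a single character, via pvIdx
theorem find_singleton (d : Char) (t : List Char) :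
    PySem.Chars.find t [d] = if d ∈ t then (pvIdx d t : Int) else -1 := by
  by_cases hm : d ∈ t
  · have hinf : [d] <:+: t := by
      obtain ⟨s, u, rfl⟩ := List.append_of_mem hm
      exact ⟨s, u, by simp⟩
    have hne : PySem.Chars.find t [d] ≠ -1 := by
      rw [Ne, PySem.Chars.find_eq_neg_one_iff]; simpa using hinf
    have hspec := PySem.Chars.findFrom_natCast_spec t [d] 0 (Nat.zero_le _)
      (by simpa [PySem.Chars.findFrom_zero] using hne)
    rw [Nat.cast_zero, PySem.Chars.findFrom_zero] at hspec
    obtain ⟨hnn, hpre, hmin⟩ := hspec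
    set n := (PySem.Chars.find t [d]).toNat with hn
    obtain ⟨v, hv⟩ := (prefix_singleton d _).1 hpre
    have hnlt : n < t.length := by
      by_contra hge
      rw [List.drop_eq_nil_of_le (by omega)] at hv
      exact (List.cons_ne_nil _ _) hv.symm
    have hgn : t[n]? = some d := by
      have h0 : (t.drop n)[(0 : Nat)]? = t[n + 0]? := List.getElem?_drop
      rw [hv] at h0
      simpa using h0.symm
    have heq : n = pvIdx d t := by
      rcases Nat.lt_trichotomy n (pvIdx d t) with h | h | h
      · exact absurd hgn (pvIdx_min d t n h)
      · exact h
      · exfalso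
        apply hmin (pvIdx d t) (Nat.zero_le _) h
        rw [prefix_singleton]
        have hlt : pvIdx d t < t.length := by
          by_contra hge
          have hg := pvIdx_getElem? d t hm
          rw [List.getElem?_eq_none (by omega)] at hg
          simp at hg
        refine ⟨t.drop (pvIdx d t + 1), ?_⟩
        rw [List.drop_eq_getElem_cons hlt]
        congr 1
        have := pvIdx_getElem? d t hm
        rw [List.getElem?_eq_getElem hlt] at this
        simpa using this
    simp only [hm, if_true]
    rw [← heq, hn, Int.toNat_of_nonneg hnn]
  · simp only [hm, if_false]
    rw [PySem.Chars.find_eq_neg_one_iff]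
    intro hinf
    exact hm (hinf.subset (by simp))

-- one step of B's fold is a min with the delimiter's first index
theorem step_eq_min (t : List Char) (cut : Nat) (d : Char) (hcut : cut ≤ t.length) :
    (let i := PySem.Chars.find t [d];
     if i ≠ -1 ∧ i < (cut : Int) then i.toNat else cut) = min cut (pvIdx d t) := by
  rw [find_singleton]
  by_cases hm : d ∈ t
  · simp only [hm, if_true]
    split_ifs with h
    · have h2 : pvIdx d t < cut := by exact_mod_cast h.2
      simp only [Int.toNat_natCast]
      omega
    · have h2 : ¬ pvIdx d t < cut := by
        intro hlt
        exact h ⟨by omega, by exact_mod_cast hlt⟩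
      omega
  · simp only [hm, if_false]
    rw [if_neg (by rintro ⟨h, -⟩; exact h rfl), pvIdx_of_not_mem d t hm]
    omega

-- the three-way min equals the takeWhile length
theorem min_eq_takeWhile (t : List Char) :
    min (min (min t.length (pvIdx ' ' t)) (pvIdx '|' t)) (pvIdx '}' t)
      = (t.takeWhile pvKeep).length := by
  induction t with
  | nil => rfl
  | cons c t ih =>
    by_cases h1 : c = ' '
    · simp [pvIdx_cons, h1, pvKeep]
    · by_cases h2 : c = '|'
      · simp [pvIdx_cons, h2, pvKeep]
      · by_cases h3 : c = '}'
        · simp [pvIdx_cons, h3, pvKeep]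
        · have hk : pvKeep c = true := by simp [pvKeep, h1, h2, h3]
          simp [pvIdx_cons, h1, h2, h3, hk]
          omega

-- B's fold computes the takeWhile length
theorem fold_eq_takeWhile (t : List Char) :
    ([' ', '|', '}'].foldl
      (fun (cut : Nat) (d : Char) =>
        let i := PySem.Chars.find t [d]
        if i ≠ -1 ∧ i < (cut : Int) then i.toNat else cut)
      t.length) = (t.takeWhile pvKeep).length := by
  have h1 := step_eq_min t t.length ' ' le_rfl
  have h2 := step_eq_min t (min t.length (pvIdx ' ' t)) '|' (by omega)
  have h3 := step_eq_min t (min (min t.length (pvIdx ' ' t)) (pvIdx '|' t)) '}' (by omega)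
  simp only [List.foldl] at *
  rw [h1, h2, h3, min_eq_takeWhile]

-- A's while loop advances exactly past the kept characters
theorem pvLoopA_eq (l : List Char) (e : Nat) :
    pvLoopA l e = e + ((l.drop e).takeWhile pvKeep).length := by
  by_cases h : e < l.length
  · rw [pvLoopA]
    rw [List.drop_eq_getElem_cons h, List.takeWhile_cons]
    by_cases hd : l[e] = ' ' ∨ l[e] = '|' ∨ l[e] = '}'
    · have hk : pvKeep l[e] = false := by
        rcases hd with h' | h' | h' <;> simp [pvKeep, h']
      simp [h, hd, hk]
    · have hk : pvKeep l[e] = true := by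
        simp only [not_or] at hd
        simp [pvKeep, hd.1, hd.2.1, hd.2.2]
      rw [dif_pos h, if_neg hd, pvLoopA_eq l (e + 1), hk]
      simp
      omega
  · rw [pvLoopA, dif_neg h, List.drop_eq_nil_of_le (by omega)]
    simp
termination_by l.length - e

-- take of the takeWhile length is takeWhile
theorem take_takeWhile_length (p : Char → Bool) (t : List Char) :
    t.take (t.takeWhile p).length = t.takeWhile p := by
  obtain ⟨u, hu⟩ := List.takeWhile_prefix (l := t) (p := p)
  have h2 : t.take (t.takeWhile p).length = (t.takeWhile p ++ u).take (t.takeWhile p).length := by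
    rw [hu]
  rw [h2, List.take_left]

-- ===== VERDICT (by name: the statement is the Claim_ definition above) =====
theorem extract_event_field_py_spec : Claim_equal_extract_event_field_py := by
  intro s _
  unfold Spec_extract_event_field_py extract_event_field_py extract_event_field_py_alt
  simp only [PySem.Str.find_eq]
  set idx := PySem.Chars.find s.toList "trigger.event.data.".toList with hidx
  by_cases h : idx = -1
  · simp [h]
  · simp only [h, if_false]
    refine congrArg (fun l => some (String.ofList (PySem.Chars.strip l))) ?_
    rw [PySem.List.slice_natCast, fold_eq_takeWhile, pvLoopA_eq,
      Nat.add_sub_cancel_left, take_takeWhile_length]
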